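-- pv_equiv track=rewrite | github.com/get543/praktikumAP-Python | Algoritma dan Module/Recursive Function/max.py | maksimum_rekursif
-- ===== SOURCE A (Python) =====
-- def maksimum_rekursif(data, index = 0):
--     # Tuliskan kode Anda di bawah.
--     # [1] Gunakan statement if bersarang untuk mencari nilai maksimum
--     # [2] Statement if bagian pertama memastikan jumlah data ada lebih dari 1 elemen
--     # [3] Statement if bagian kedua (didalam if bagian pertama) menentukan apakah elemen pertama list lebih besar dari elemen lainnya
--
--     if (index == len(data)): return None
--
--     max_sisa = maksimum_rekursif(data, index + 1)
--
--     element_sekarang = data[index]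
--
--     if ((max_sisa is None) or (element_sekarang > max_sisa)):
--         return element_sekarang
--     else:
--         return max_sisa
-- ===== SOURCE B (Python) =====
-- def maksimum_rekursif(data, index = 0):
--     result = None
--     for i in range(index, len(data)):
--         x = data[i]
--         if result is None or x > result:
--             result = x
--     return result
-- ===== Notes on version B (the rewrite author's own statement) =====
-- stated objective: simpler
-- what changed: Replaces the tail-first recursion with a single iterative left-to-right scan that maintains a running maximum (no recursion, no call stack).
import Mathlib
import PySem

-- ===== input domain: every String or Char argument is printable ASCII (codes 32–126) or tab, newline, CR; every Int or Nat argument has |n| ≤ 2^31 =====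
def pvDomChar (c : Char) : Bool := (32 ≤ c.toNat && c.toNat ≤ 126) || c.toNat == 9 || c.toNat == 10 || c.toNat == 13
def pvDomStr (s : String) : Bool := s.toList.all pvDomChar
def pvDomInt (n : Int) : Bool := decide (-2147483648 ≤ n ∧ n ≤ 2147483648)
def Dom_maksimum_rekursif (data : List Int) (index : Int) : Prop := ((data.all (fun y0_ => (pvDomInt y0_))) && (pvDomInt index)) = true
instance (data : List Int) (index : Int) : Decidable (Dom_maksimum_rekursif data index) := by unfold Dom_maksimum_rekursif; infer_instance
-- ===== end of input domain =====

-- B replaces the tail-first recursion by an iterative running-maximum scan; equivalence is proved on -len(data) ≤ index ≤ len(data).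

-- ===== PORT A =====
def maksimum_rekursif (data : List Int) (index : Int) : Option Int :=
  if index = (data.length : Int) then none
  else if (data.length : Int) < index then none  -- Python recurses forever here (RecursionError); excluded by Pre_
  else
    let max_sisa := maksimum_rekursif data (index + 1)
    match PySem.List.pyGet? data index with
    | none => none  -- IndexError in Python; excluded by Pre_
    | some element_sekarang =>
      match max_sisa with
      | none => some element_sekarang
      | some m => if element_sekarang > m then some element_sekarang else some m
termination_by (((data.length : Int) - index).toNat)
decreasing_by
  rename_i h1 h2
  omega

-- ===== PORT B =====
-- loop body of B: one step of the running maximum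
def pvStep (data : List Int) (result : Option Int) (i : Int) : Option Int :=
  match PySem.List.pyGet? data i with
  | none => result  -- IndexError in Python; excluded by Pre_
  | some x =>
    match result with
    | none => some x
    | some r => if x > r then some x else some r

def maksimum_rekursif_alt (data : List Int) (index : Int) : Option Int :=
  (PySem.List.pyRange index (data.length : Int) 1).foldl (pvStep data) none

-- ===== PRECONDITION & SPEC =====
-- Pre_ excludes index > len(data) (A recurses forever: RecursionError) and index < -len(data) (A raises IndexError).
def Pre_maksimum_rekursif (data : List Int) (index : Int) : Prop :=
  -(data.length : Int) ≤ index ∧ index ≤ (data.length : Int)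
instance (data : List Int) (index : Int) : Decidable (Pre_maksimum_rekursif data index) := by
  unfold Pre_maksimum_rekursif; infer_instance

def pvWitness_maksimum_rekursif : List Int × Int := ([3, 1, 4, 1, 5], 0)

def Spec_maksimum_rekursif (data : List Int) (index : Int) (out : Option Int) : Prop := out = maksimum_rekursif_alt data index
instance (data : List Int) (index : Int) (out : Option Int) : Decidable (Spec_maksimum_rekursif data index out) := by unfold Spec_maksimum_rekursif; infer_instance

-- ===== CLAIM (what is proved, stated in full; the proofs are below) =====
def Claim_equal_maksimum_rekursif : Prop := ∀ (data : List Int) (index : Int), Dom_maksimum_rekursif data index → Pre_maksimum_rekursif data index → Spec_maksimum_rekursif data index (maksimum_rekursif data index)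
-- ===== LEMMAS AND PROOFS =====

-- proof-only variant of the loop body on a present accumulator, phrased with max
def pvG (data : List Int) (a : Int) (i : Int) : Int :=
  match PySem.List.pyGet? data i with
  | none => a
  | some x => max a x

lemma pvStep_some (data : List Int) (a i : Int) :
    pvStep data (some a) i = some (pvG data a i) := by
  unfold pvStep pvG
  cases PySem.List.pyGet? data i with
  | none => rfl
  | some x => simp only; split_ifs with h <;> simp <;> omega

lemma foldl_pvStep_some (data : List Int) (l : List Int) (a : Int) :
    l.foldl (pvStep data) (some a) = some (l.foldl (pvG data) a) := by
  induction l generalizing a with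
  | nil => rfl
  | cons i t ih => simp only [List.foldl_cons, pvStep_some, ih]

lemma max_foldl_pvG (data : List Int) (t : List Int) (e x : Int) :
    max e (t.foldl (pvG data) x) = t.foldl (pvG data) (max e x) := by
  induction t generalizing x with
  | nil => rfl
  | cons i t ih =>
    simp only [List.foldl_cons]
    rw [ih]
    congr 1
    unfold pvG
    cases PySem.List.pyGet? data i with
    | none => rfl
    | some v => simp only; omega

lemma combine_foldl (data : List Int) (l : List Int) (e : Int) :
    (match l.foldl (pvStep data) none with
     | none => some e
     | some m => if e > m then some e else some m) = l.foldl (pvStep data) (some e) := by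
  induction l generalizing e with
  | nil => rfl
  | cons i t ih =>
    simp only [List.foldl_cons]
    cases h : PySem.List.pyGet? data i with
    | none =>
      have h0 : pvStep data none i = none := by unfold pvStep; rw [h]
      have h1 : pvStep data (some e) i = some e := by unfold pvStep; rw [h]
      rw [h0, h1]
      exact ih e
    | some x =>
      have h0 : pvStep data none i = some x := by unfold pvStep; rw [h]
      have h1 : pvStep data (some e) i = some (max e x) := by
        unfold pvStep; rw [h]; simp only; split_ifs <;> (congr 1; omega)
      rw [h0, h1, foldl_pvStep_some, foldl_pvStep_some, ← max_foldl_pvG]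
      generalize t.foldl (pvG data) x = M
      show (if e > M then some e else some M) = some (max e M)
      split_ifs <;> (congr 1; omega)

lemma main_lemma (data : List Int) : ∀ (n : Nat) (index : Int),
    n = ((data.length : Int) - index).toNat →
    -(data.length : Int) ≤ index → index ≤ (data.length : Int) →
    maksimum_rekursif data index = maksimum_rekursif_alt data index := by
  intro n
  induction n with
  | zero =>
    intro index hn h1 h2
    have : index = (data.length : Int) := by omega
    subst this
    rw [maksimum_rekursif, maksimum_rekursif_alt, if_pos rfl,
        PySem.List.pyRange_one_eq_nil (by omega)]
    rfl
  | succ n ih =>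
    intro index hn h1 h2
    have hlt : index < (data.length : Int) := by omega
    obtain ⟨e, he⟩ : ∃ e, PySem.List.pyGet? data index = some e := by
      cases h : PySem.List.pyGet? data index with
      | none =>
        rw [PySem.List.pyGet?_eq_none_iff] at h
        exact absurd ⟨h1, hlt⟩ h
      | some e => exact ⟨e, rfl⟩
    rw [maksimum_rekursif, if_neg (by omega), if_neg (by omega), he]
    rw [maksimum_rekursif_alt, PySem.List.pyRange_one_cons hlt]
    simp only [List.foldl_cons]
    have hstep : pvStep data none index = some e := by unfold pvStep; rw [he]
    rw [hstep]
    have hrec := ih (index + 1) (by omega) (by omega) (by omega)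
    rw [maksimum_rekursif_alt] at hrec
    rw [hrec]
    exact combine_foldl data _ e

-- ===== VERDICT (by name: the statement is the Claim_ definition above) =====
theorem maksimum_rekursif_spec : Claim_equal_maksimum_rekursif := by
  intro data index _ hpre
  unfold Spec_maksimum_rekursif
  exact main_lemma data _ index rfl hpre.1 hpre.2
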